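-- pv_equiv track=rewrite | github.com/elimelt/docker-scripts | benchmarks/docker-deployment/generate-composer.py | generate_docker_compose
-- ===== SOURCE A (Python) =====
-- def generate_docker_compose(num_servers, server_port_start = 3002):
--     services = {}
--     client_ports = []
--
--     # generate server services
--     for port in range(server_port_start, num_servers + server_port_start):
--         service_name = f'server{port - server_port_start + 1}'
--         port_mapping = f"\"{port}:{3000}\""
--         services[service_name] = {
--             "build": "./server",
--             "ports": [port_mapping],
--             "environment": ["PORT=3000"],
--             "volumes": ["./server:/app"]
--         }
--
--
--
--     # generate client services
--     for port in range(4001, 4001 + 5):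
--         service_name = f'client{port - 4000}'
--         port_mapping = f"\"{port}:{3000}\""
--         services[service_name] = {
--             "build": "./client",
--             "ports": [port_mapping],
--             "environment": [f"SERVER_PORT_START={server_port_start}", f"SERVER_PORT_END={num_servers + server_port_start - 1}", f"CLIENT_NUM={port - 4000}"],
--             "volumes": ["./client:/app"]
--         }
--
--     # convert services dictionary to yaml format
--     docker_compose_content = "version: '3'\n\nservices:\n"
--     for service, config in services.items():
--         docker_compose_content += f"  {service}:\n"
--         for key, value in config.items():
--
--             if key == "build":
--                 docker_compose_content += f"    {key}: {value}\n"
--                 continue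
--
--             if isinstance(value, list):
--                 value = "\n".join([f"      - {item}" for item in value])
--             docker_compose_content += f"    {key}:\n{value}\n"
--         docker_compose_content += "\n"
--
--     return docker_compose_content
-- ===== SOURCE B (Python) =====
-- def generate_docker_compose(num_servers, server_port_start=3002):
--     lines = ["version: '3'", "", "services:"]
--     for i in range(1, num_servers + 1):
--         port = server_port_start + i - 1
--         lines += [
--             f"  server{i}:",
--             "    build: ./server",
--             "    ports:",
--             f'      - "{port}:3000"',
--             "    environment:",
--             "      - PORT=3000",
--             "    volumes:",
--             "      - ./server:/app",
--             "",
--         ]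
--     end = num_servers + server_port_start - 1
--     for i in range(1, 6):
--         lines += [
--             f"  client{i}:",
--             "    build: ./client",
--             "    ports:",
--             f'      - "{4000 + i}:3000"',
--             "    environment:",
--             f"      - SERVER_PORT_START={server_port_start}",
--             f"      - SERVER_PORT_END={end}",
--             f"      - CLIENT_NUM={i}",
--             "    volumes:",
--             "      - ./client:/app",
--             "",
--         ]
--     return "\n".join(lines) + "\n"
-- ===== Notes on version B (the rewrite author's own statement) =====
-- stated objective: simpler
-- what changed: Drops the intermediate services dict and the generic key/value YAML serializer; B emits the output lines directly in two loops and joins them once at the end.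
import Mathlib
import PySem

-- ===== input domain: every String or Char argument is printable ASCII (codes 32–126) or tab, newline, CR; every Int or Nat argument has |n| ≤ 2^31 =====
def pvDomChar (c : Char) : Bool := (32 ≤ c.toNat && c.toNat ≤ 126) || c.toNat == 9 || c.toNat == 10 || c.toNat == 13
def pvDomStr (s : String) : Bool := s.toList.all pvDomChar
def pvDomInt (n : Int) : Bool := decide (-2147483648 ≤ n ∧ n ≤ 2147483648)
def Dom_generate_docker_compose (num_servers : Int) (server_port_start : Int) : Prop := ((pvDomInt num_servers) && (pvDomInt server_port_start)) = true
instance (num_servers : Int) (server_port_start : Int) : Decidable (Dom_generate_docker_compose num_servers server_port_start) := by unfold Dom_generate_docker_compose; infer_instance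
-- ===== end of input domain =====

-- B drops A's intermediate services dict and generic YAML serializer and emits the output
-- lines directly in two loops, joined once at the end (objective: simpler; same cost).

-- ===== PORT A =====
-- Values of A's per-service config dict are either a string ("build") or a list of strings.
inductive PVal
  | s : List Char → PVal
  | l : List (List Char) → PVal
deriving Repr, DecidableEq

-- f"\"{port}:{3000}\""
def pvPortMapping (port : Int) : List Char :=
  "\"".toList ++ PySem.Int.toChars port ++ ":".toList ++ PySem.Int.toChars 3000 ++ "\"".toList

def pvServerName (port server_port_start : Int) : List Char :=
  "server".toList ++ PySem.Int.toChars (port - server_port_start + 1)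

def pvServerConfig (port : Int) : PySem.Dict (List Char) PVal :=
  PySem.Dict.ofList [
    ("build".toList, PVal.s "./server".toList),
    ("ports".toList, PVal.l [pvPortMapping port]),
    ("environment".toList, PVal.l ["PORT=3000".toList]),
    ("volumes".toList, PVal.l ["./server:/app".toList])]

def pvClientName (port : Int) : List Char :=
  "client".toList ++ PySem.Int.toChars (port - 4000)

def pvClientConfig (port num_servers server_port_start : Int) : PySem.Dict (List Char) PVal :=
  PySem.Dict.ofList [
    ("build".toList, PVal.s "./client".toList),
    ("ports".toList, PVal.l [pvPortMapping port]),
    ("environment".toList, PVal.l [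
      "SERVER_PORT_START=".toList ++ PySem.Int.toChars server_port_start,
      "SERVER_PORT_END=".toList ++ PySem.Int.toChars (num_servers + server_port_start - 1),
      "CLIENT_NUM=".toList ++ PySem.Int.toChars (port - 4000)]),
    ("volumes".toList, PVal.l ["./client:/app".toList])]

-- the two dict-building loops of A
def pvServices (num_servers server_port_start : Int) : PySem.Dict (List Char) (PySem.Dict (List Char) PVal) :=
  let services : PySem.Dict (List Char) (PySem.Dict (List Char) PVal) := PySem.Dict.empty
  let services := (PySem.List.pyRange server_port_start (num_servers + server_port_start) 1).foldl
    (fun d port => d.insert (pvServerName port server_port_start) (pvServerConfig port)) services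
  (PySem.List.pyRange 4001 (4001 + 5) 1).foldl
    (fun d port => d.insert (pvClientName port) (pvClientConfig port num_servers server_port_start)) services

-- what the serializer's inner loop appends for one (key, value) item
-- (the PVal.l case under "build" is unreachable: A only stores a string under "build")
def pvFieldChunk (kv : List Char × PVal) : List Char :=
  if kv.1 == "build".toList then
    "    ".toList ++ kv.1 ++ ": ".toList ++ (match kv.2 with | .s v => v | .l _ => []) ++ "\n".toList
  else
    let value := match kv.2 with
      | .l items => PySem.Chars.join "\n".toList (items.map (fun item => "      - ".toList ++ item))
      | .s v => v
    "    ".toList ++ kv.1 ++ ":\n".toList ++ value ++ "\n".toList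

def generate_docker_compose (num_servers : Int) (server_port_start : Int) : String :=
  let services := pvServices num_servers server_port_start
  let content := "version: '3'\n\nservices:\n".toList
  let content := services.items.foldl (fun acc sc =>
    let acc := acc ++ "  ".toList ++ sc.1 ++ ":\n".toList
    let acc := sc.2.items.foldl (fun acc kv => acc ++ pvFieldChunk kv) acc
    acc ++ "\n".toList) content
  String.ofList content

-- ===== PORT B =====
def altServerLines (i server_port_start : Int) : List (List Char) :=
  let port := server_port_start + i - 1
  [ "  server".toList ++ PySem.Int.toChars i ++ ":".toList,
    "    build: ./server".toList,
    "    ports:".toList,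
    "      - \"".toList ++ PySem.Int.toChars port ++ ":3000\"".toList,
    "    environment:".toList,
    "      - PORT=3000".toList,
    "    volumes:".toList,
    "      - ./server:/app".toList,
    [] ]

def altClientLines (i endPort server_port_start : Int) : List (List Char) :=
  [ "  client".toList ++ PySem.Int.toChars i ++ ":".toList,
    "    build: ./client".toList,
    "    ports:".toList,
    "      - \"".toList ++ PySem.Int.toChars (4000 + i) ++ ":3000\"".toList,
    "    environment:".toList,
    "      - SERVER_PORT_START=".toList ++ PySem.Int.toChars server_port_start,
    "      - SERVER_PORT_END=".toList ++ PySem.Int.toChars endPort,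
    "      - CLIENT_NUM=".toList ++ PySem.Int.toChars i,
    "    volumes:".toList,
    "      - ./client:/app".toList,
    [] ]

def generate_docker_compose_alt (num_servers : Int) (server_port_start : Int) : String :=
  let lines := ["version: '3'".toList, ([] : List Char), "services:".toList]
  let lines := (PySem.List.pyRange 1 (num_servers + 1) 1).foldl
    (fun ls i => ls ++ altServerLines i server_port_start) lines
  let endP := num_servers + server_port_start - 1
  let lines := (PySem.List.pyRange 1 6 1).foldl
    (fun ls i => ls ++ altClientLines i endP server_port_start) lines
  String.ofList (PySem.Chars.join "\n".toList lines ++ "\n".toList)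

-- ===== PRECONDITION & SPEC =====
def Spec_generate_docker_compose (num_servers : Int) (server_port_start : Int) (out : String) : Prop := out = generate_docker_compose_alt num_servers server_port_start
instance (num_servers : Int) (server_port_start : Int) (out : String) : Decidable (Spec_generate_docker_compose num_servers server_port_start out) := by unfold Spec_generate_docker_compose; infer_instance

-- ===== CLAIM (what is proved, stated in full; the proofs are below) =====
def Claim_equal_generate_docker_compose : Prop := ∀ (num_servers : Int) (server_port_start : Int), Dom_generate_docker_compose num_servers server_port_start → Spec_generate_docker_compose num_servers server_port_start (generate_docker_compose num_servers server_port_start)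

-- ===== LEMMAS AND PROOFS =====

-- injectivity of str(n) on nonnegative ints (used for the Nodup side condition of the dict lemma)
def pvDigits (n : Nat) : List Char :=
  if n < 10 then [Nat.digitChar n] else pvDigits (n / 10) ++ [Nat.digitChar (n % 10)]
decreasing_by exact Nat.div_lt_self (by omega) (by omega)

theorem pvToDigitsCore_eq (fuel : Nat) : ∀ (n : Nat) (ds : List Char), n < fuel →
    Nat.toDigitsCore 10 fuel n ds = pvDigits n ++ ds := by
  induction fuel with
  | zero => intro n ds h; omega
  | succ f ih =>
    intro n ds h
    rw [Nat.toDigitsCore]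
    by_cases h10 : n / 10 = 0
    · have hn : n < 10 := by omega
      simp [h10, pvDigits, hn, Nat.mod_eq_of_lt hn]
    · have hn : ¬ n < 10 := by omega
      simp only [h10]
      rw [ih (n / 10) _ (by omega)]
      conv_rhs => rw [pvDigits]
      rw [if_neg hn]
      simp

theorem pvToDigits_eq (n : Nat) : Nat.toDigits 10 n = pvDigits n := by
  simpa using pvToDigitsCore_eq (n + 1) n [] (by omega)

def pvVal (cs : List Char) : Nat := cs.foldl (fun a c => 10 * a + (c.toNat - 48)) 0

theorem pvValF_pvDigits : ∀ n a, (pvDigits n).foldl (fun a c => 10 * a + (c.toNat - 48)) a = a * 10 ^ (pvDigits n).length + n := by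
  intro n
  induction n using Nat.strong_induction_on with
  | _ n ih =>
    intro a
    by_cases h : n < 10
    · rw [pvDigits]
      simp only [if_pos h, List.foldl_cons, List.foldl_nil, List.length_cons, List.length_nil]
      have : (Nat.digitChar n).toNat - 48 = n := by interval_cases n <;> rfl
      simp [this]; ring
    · rw [pvDigits]
      simp only [if_neg h, List.foldl_append, List.length_append]
      rw [ih (n / 10) (Nat.div_lt_self (by omega) (by omega))]
      have : (Nat.digitChar (n % 10)).toNat - 48 = n % 10 := by
        have := Nat.mod_lt n (show 0 < 10 by omega)
        interval_cases h' : n % 10 <;> rfl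
      simp [this, pow_succ]
      have := Nat.div_add_mod n 10
      ring_nf
      omega

theorem pvVal_pvDigits (n : Nat) : pvVal (pvDigits n) = n := by
  simpa [pvVal] using pvValF_pvDigits n 0

theorem pvToChars_inj {a b : Int} (ha : 0 ≤ a) (hb : 0 ≤ b)
    (h : PySem.Int.toChars a = PySem.Int.toChars b) : a = b := by
  unfold PySem.Int.toChars at h
  rw [if_neg (by omega), if_neg (by omega)] at h
  rw [pvToDigits_eq, pvToDigits_eq] at h
  have := congrArg pvVal h
  rw [pvVal_pvDigits, pvVal_pvDigits] at this
  omega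

-- '\n'.join(lines) + '\n'  =  every line followed by '\n'
theorem pvJoinAppend (s : List Char) : ∀ (xs : List (List Char)) (x : List Char),
    PySem.Chars.join s (x :: xs) ++ s = (x ++ s) ++ xs.flatMap (· ++ s) := by
  intro xs
  induction xs with
  | nil => intro x; simp [PySem.Chars.join, List.intercalate]
  | cons y ys ih =>
    intro x
    have h1 : PySem.Chars.join s (x :: y :: ys) = x ++ s ++ PySem.Chars.join s (y :: ys) := by
      simp [PySem.Chars.join, List.intercalate, List.intersperse]
    rw [h1, List.append_assoc, List.append_assoc, ih y]
    simp

-- one whole service block of A's serializer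
def pvBlock (sc : List Char × PySem.Dict (List Char) PVal) : List Char :=
  "  ".toList ++ sc.1 ++ ":\n".toList ++ sc.2.items.flatMap pvFieldChunk ++ "\n".toList

def pvServerItems (num_servers server_port_start : Int) : List (List Char × PySem.Dict (List Char) PVal) :=
  (PySem.List.pyRange server_port_start (num_servers + server_port_start) 1).map
    (fun port => (pvServerName port server_port_start, pvServerConfig port))

def pvClientItems (num_servers server_port_start : Int) : List (List Char × PySem.Dict (List Char) PVal) :=
  (PySem.List.pyRange 4001 (4001 + 5) 1).map
    (fun port => (pvClientName port, pvClientConfig port num_servers server_port_start))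

theorem pvServices_items (n sps : Int) :
    (pvServices n sps).items = pvServerItems n sps ++ pvClientItems n sps := by
  unfold pvServices
  have hnodup : ((PySem.List.pyRange sps (n + sps) 1).map (fun port => pvServerName port sps)).Nodup := by
    refine List.Nodup.map_on ?_ (PySem.List.nodup_pyRange_one sps (n + sps))
    intro x hx y hy hxy
    rw [PySem.List.mem_pyRange_one] at hx hy
    unfold pvServerName at hxy
    have h2 := List.append_cancel_left hxy
    have := pvToChars_inj (a := x - sps + 1) (b := y - sps + 1) (by omega) (by omega) h2
    omega
  have h1 := PySem.Dict.items_foldl_insert_fresh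
    (PySem.List.pyRange sps (n + sps) 1)
    (fun port => pvServerName port sps) (fun port => pvServerConfig port)
    PySem.Dict.empty (by intro a _; simp) hnodup
  set d1 := (PySem.List.pyRange sps (n + sps) 1).foldl
    (fun d port => d.insert (pvServerName port sps) (pvServerConfig port)) PySem.Dict.empty with hd1
  have hitems1 : d1.items = pvServerItems n sps := by
    simpa [pvServerItems] using h1
  have hfresh : ∀ a ∈ PySem.List.pyRange 4001 (4001 + 5) 1, d1.contains (pvClientName a) = false := by
    intro a _
    show (d1.items.any fun p => p.1 == pvClientName a) = false
    rw [hitems1]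
    simp only [pvServerItems, List.any_map, List.any_eq_false]
    intro p _
    simp only [Function.comp]
    unfold pvServerName pvClientName
    simp
  have hnodup2 : ((PySem.List.pyRange 4001 (4001 + 5) 1).map pvClientName).Nodup := by decide
  have h2 := PySem.Dict.items_foldl_insert_fresh
    (PySem.List.pyRange 4001 (4001 + 5) 1)
    (fun port => pvClientName port) (fun port => pvClientConfig port n sps)
    d1 hfresh hnodup2
  rw [h2, hitems1]
  rfl

-- A's whole output as header ++ concatenation of blocks
theorem pvFoldBlocks (items : List (List Char × PySem.Dict (List Char) PVal)) (init : List Char) :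
    items.foldl (fun acc sc =>
      let acc := acc ++ "  ".toList ++ sc.1 ++ ":\n".toList
      let acc := sc.2.items.foldl (fun acc kv => acc ++ pvFieldChunk kv) acc
      acc ++ "\n".toList) init = init ++ items.flatMap pvBlock := by
  have hb : (fun (acc : List Char) (sc : List Char × PySem.Dict (List Char) PVal) =>
        let acc := acc ++ "  ".toList ++ sc.1 ++ ":\n".toList
        let acc := sc.2.items.foldl (fun acc kv => acc ++ pvFieldChunk kv) acc
        acc ++ "\n".toList)
      = fun acc sc => acc ++ pvBlock sc := by
    funext acc sc
    show (sc.2.items.foldl (fun acc kv => acc ++ pvFieldChunk kv) (acc ++ "  ".toList ++ sc.1 ++ ":\n".toList)) ++ "\n".toList = _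
    rw [PySem.List.foldl_append_eq_flatMap]
    simp [pvBlock]
  rw [hb, PySem.List.foldl_append_eq_flatMap]

theorem pvA_shape (n sps : Int) :
    generate_docker_compose n sps =
      String.ofList ("version: '3'\n\nservices:\n".toList ++ (pvServices n sps).items.flatMap pvBlock) := by
  unfold generate_docker_compose
  exact congrArg String.ofList (pvFoldBlocks _ _)

-- B's output as a concatenation of '\n'-terminated lines
theorem pvB_shape (n sps : Int) :
    generate_docker_compose_alt n sps =
      String.ofList ("version: '3'\n\nservices:\n".toList
        ++ (PySem.List.pyRange 1 (n + 1) 1).flatMap (fun i => (altServerLines i sps).flatMap (· ++ "\n".toList))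
        ++ (PySem.List.pyRange 1 6 1).flatMap (fun i => (altClientLines i (n + sps - 1) sps).flatMap (· ++ "\n".toList))) := by
  unfold generate_docker_compose_alt
  refine congrArg String.ofList ?_
  rw [PySem.List.foldl_append_eq_flatMap, PySem.List.foldl_append_eq_flatMap,
    List.append_assoc]
  simp only [List.cons_append, List.nil_append]
  rw [pvJoinAppend]
  simp [List.flatMap_append, List.flatMap_assoc]

set_option maxHeartbeats 1000000 in
theorem pvServerConfig_items (port : Int) :
    (pvServerConfig port).items = [
      ("build".toList, PVal.s "./server".toList),
      ("ports".toList, PVal.l [pvPortMapping port]),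
      ("environment".toList, PVal.l ["PORT=3000".toList]),
      ("volumes".toList, PVal.l ["./server:/app".toList])] := rfl

set_option maxHeartbeats 1000000 in
theorem pvClientConfig_items (port n sps : Int) :
    (pvClientConfig port n sps).items = [
      ("build".toList, PVal.s "./client".toList),
      ("ports".toList, PVal.l [pvPortMapping port]),
      ("environment".toList, PVal.l [
        "SERVER_PORT_START=".toList ++ PySem.Int.toChars sps,
        "SERVER_PORT_END=".toList ++ PySem.Int.toChars (n + sps - 1),
        "CLIENT_NUM=".toList ++ PySem.Int.toChars (port - 4000)]),
      ("volumes".toList, PVal.l ["./client:/app".toList])] := rfl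

-- one server block of A = the corresponding lines of B
set_option maxHeartbeats 1000000 in
set_option maxRecDepth 4096 in
theorem pvServerBlock_eq (port sps : Int) :
    pvBlock (pvServerName port sps, pvServerConfig port)
      = (altServerLines (port - sps + 1) sps).flatMap (· ++ "\n".toList) := by
  have harg : sps + (port - sps + 1) - 1 = port := by ring
  simp [pvBlock, pvServerConfig_items, pvFieldChunk, pvServerName, pvPortMapping,
    altServerLines, harg, PySem.Chars.join, List.intercalate,
    show PySem.Int.toChars 3000 = "3000".toList from rfl]

-- one client block of A = the corresponding lines of B
set_option maxHeartbeats 1000000 in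
set_option maxRecDepth 4096 in
theorem pvClientBlock_eq (port n sps : Int) :
    pvBlock (pvClientName port, pvClientConfig port n sps)
      = (altClientLines (port - 4000) (n + sps - 1) sps).flatMap (· ++ "\n".toList) := by
  have harg : 4000 + (port - 4000) = port := by ring
  simp [pvBlock, pvClientConfig_items, pvFieldChunk, pvClientName, pvPortMapping,
    altClientLines, harg, PySem.Chars.join, List.intercalate, List.intersperse,
    show PySem.Int.toChars 3000 = "3000".toList from rfl]

-- ===== VERDICT (by name: the statement is the Claim_ definition above) =====
theorem generate_docker_compose_spec : Claim_equal_generate_docker_compose := by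
  intro n sps _
  show generate_docker_compose n sps = generate_docker_compose_alt n sps
  rw [pvA_shape, pvB_shape, pvServices_items]
  congr 1
  rw [List.flatMap_append, ← List.append_assoc]
  congr 1
  · congr 1
    unfold pvServerItems
    rw [List.flatMap_map]
    rw [PySem.List.pyRange_one sps (n + sps), PySem.List.pyRange_one 1 (n + 1)]
    rw [List.flatMap_map, List.flatMap_map]
    have hn : (n + sps - sps).toNat = (n + 1 - 1).toNat := by omega
    rw [hn]
    apply List.flatMap_congr  -- pointwise over List.range
    intro k _
    rw [pvServerBlock_eq]
    have : sps + (k : Int) - sps + 1 = 1 + (k : Int) := by ring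
    rw [this]
  · unfold pvClientItems
    rw [List.flatMap_map]
    have hr : PySem.List.pyRange 4001 (4001 + 5) 1 = [4001, 4002, 4003, 4004, 4005] := by decide
    have hr2 : PySem.List.pyRange 1 6 1 = [1, 2, 3, 4, 5] := by decide
    rw [hr, hr2]
    simp only [List.flatMap_cons, List.flatMap_nil, List.append_nil]
    rw [pvClientBlock_eq, pvClientBlock_eq, pvClientBlock_eq, pvClientBlock_eq, pvClientBlock_eq]
    norm_num
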